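-- pv_equiv track=rewrite | github.com/mnieber/gen | moonleap/blocks/line.py | _preprocess_words
-- ===== SOURCE A (Python) =====
-- def _preprocess_words(words):
--     result = []
--     for word in words:
--         prefix = []
--         postfix = []
--
--         while word.startswith("("):
--             prefix.append("(")
--             word = word[1:]
--
--         while word.endswith(")"):
--             postfix.insert(0, ")")
--             word = word[:-1]
--
--         result.extend(prefix)
--         result.append(word)
--         result.extend(postfix)
--     return result
-- ===== SOURCE B (Python) =====
-- import re
--
-- _PAREN_RE = re.compile(r"(\(*)(.*?)(\)*)", re.DOTALL)
--
-- def _preprocess_words(words):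
--     result = []
--     for word in words:
--         m = _PAREN_RE.fullmatch(word)
--         lead, core, trail = m.group(1), m.group(2), m.group(3)
--         result.extend(["("] * len(lead))
--         result.append(core)
--         result.extend([")"] * len(trail))
--     return result
-- ===== Notes on version B (the rewrite author's own statement) =====
-- stated objective: idiomatic
-- what changed: Replaces the two character-peeling while loops per word with a single regex fullmatch r'(\(*)(.*?)(\)*)' (DOTALL) that partitions each word into leading-paren run, core and trailing-paren run in one step.
import Mathlib
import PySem

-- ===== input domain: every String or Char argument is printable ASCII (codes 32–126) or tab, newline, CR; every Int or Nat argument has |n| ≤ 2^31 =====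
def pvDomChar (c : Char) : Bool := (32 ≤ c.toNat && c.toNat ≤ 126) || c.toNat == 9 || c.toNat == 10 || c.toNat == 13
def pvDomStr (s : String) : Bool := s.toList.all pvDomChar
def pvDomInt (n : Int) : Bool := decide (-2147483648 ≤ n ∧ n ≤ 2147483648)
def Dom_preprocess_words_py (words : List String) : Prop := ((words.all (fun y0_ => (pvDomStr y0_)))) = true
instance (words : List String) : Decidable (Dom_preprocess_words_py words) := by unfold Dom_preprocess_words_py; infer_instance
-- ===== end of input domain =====

-- B replaces A's two char-peeling while loops per word by a single regex partition
-- (leading-paren run / non-greedy core / trailing-paren run); equivalence proved for all inputs.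

-- ===== PORT A =====
-- while word.startswith("("): prefix.append("("); word = word[1:]
def pvPrefixLoop (prefix_ : List String) (word : String) : List String × String :=
  if h : PySem.Str.startswith word "(" then
    pvPrefixLoop (prefix_ ++ ["("]) (PySem.Str.slice word (some 1) none)
  else (prefix_, word)
termination_by word.toList.length
decreasing_by
  have hp : ('(' : Char) :: [] <+: word.toList := by
    simpa using (PySem.Chars.startswith_iff word.toList ['(']).1 (by simpa [PySem.Str.startswith_eq] using h)
  obtain ⟨t, ht⟩ := hp
  simp [PySem.Str.slice, PySem.List.slice_from_one, ← ht]

-- while word.endswith(")"): postfix.insert(0, ")"); word = word[:-1]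
def pvPostfixLoop (postfix_ : List String) (word : String) : List String × String :=
  if h : PySem.Str.endswith word ")" then
    pvPostfixLoop (PySem.List.insert postfix_ 0 ")") (PySem.Str.slice word none (some (-1)))
  else (postfix_, word)
termination_by word.toList.length
decreasing_by
  have hp : [')'] <:+ word.toList := by
    simpa using (PySem.Chars.endswith_iff word.toList [')']).1 (by simpa [PySem.Str.endswith_eq] using h)
  obtain ⟨t, ht⟩ := hp
  have hsl := PySem.Str.slice_to_neg_one word
  rw [hsl, ← ht]
  simp

def preprocess_words_py (words : List String) : List String :=
  words.foldl (fun result word =>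
    let pr := pvPrefixLoop [] word
    let po := pvPostfixLoop [] pr.2
    result ++ pr.1 ++ [po.2] ++ po.1) []

-- ===== PORT B =====
-- Hand port of the regex fullmatch r'(\(*)(.*?)(\)*)' with re.DOTALL (exact for this
-- pattern): group1 is the maximal leading '(' run; the non-greedy middle makes group3
-- the maximal trailing ')' run of the remainder; group2 is what is left in between.
def pvRegexSplit (w : String) : List String :=
  let cs := w.toList
  let lead := (cs.takeWhile (fun c => c == '(')).length
  let rest := cs.drop lead
  let trail := (rest.reverse.takeWhile (fun c => c == ')')).length
  List.replicate lead "(" ++ [String.ofList (rest.take (rest.length - trail))] ++ List.replicate trail ")"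

def preprocess_words_py_alt (words : List String) : List String :=
  words.flatMap pvRegexSplit

-- ===== PRECONDITION & SPEC =====
def Spec_preprocess_words_py (words : List String) (out : List String) : Prop := out = preprocess_words_py_alt words
instance (words : List String) (out : List String) : Decidable (Spec_preprocess_words_py words out) := by unfold Spec_preprocess_words_py; infer_instance

-- ===== CLAIM (what is proved, stated in full; the proofs are below) =====
def Claim_equal_preprocess_words_py : Prop := ∀ (words : List String), Dom_preprocess_words_py words → Spec_preprocess_words_py words (preprocess_words_py words)

-- ===== LEMMAS AND PROOFS =====

lemma pvStartswith_paren (w : String) :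
    PySem.Str.startswith w "(" = true ↔ ∃ t, w.toList = '(' :: t := by
  rw [PySem.Str.startswith_eq]
  constructor
  · intro h
    obtain ⟨t, ht⟩ := (PySem.Chars.startswith_iff w.toList ['(']).1 (by simpa using h)
    exact ⟨t, ht.symm⟩
  · rintro ⟨t, ht⟩
    exact (PySem.Chars.startswith_iff w.toList ['(']).2 ⟨t, by simp [ht]⟩

lemma pvEndswith_paren (w : String) :
    PySem.Str.endswith w ")" = true ↔ ∃ t, w.toList = t ++ [')'] := by
  rw [PySem.Str.endswith_eq]
  constructor
  · intro h
    obtain ⟨t, ht⟩ := (PySem.Chars.endswith_iff w.toList [')']).1 (by simpa using h)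
    exact ⟨t, ht.symm⟩
  · rintro ⟨t, ht⟩
    exact (PySem.Chars.endswith_iff w.toList [')']).2 ⟨t, by simp [ht]⟩

lemma pvPrefixLoop_eq (w : String) (pre : List String) :
    pvPrefixLoop pre w =
      (pre ++ List.replicate (w.toList.takeWhile (fun c => c == '(')).length "(",
       String.ofList (w.toList.dropWhile (fun c => c == '('))) := by
  by_cases h : PySem.Str.startswith w "(" = true
  · obtain ⟨t, ht⟩ := (pvStartswith_paren w).1 h
    have hslice : (PySem.Str.slice w (some 1) none).toList = t := by
      simp [PySem.Str.slice, PySem.List.slice_from_one, ht]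
    rw [pvPrefixLoop, dif_pos h, pvPrefixLoop_eq (PySem.Str.slice w (some 1) none) (pre ++ ["("])]
    simp [hslice, ht, List.replicate_succ]
  · rw [pvPrefixLoop, dif_neg h]
    have hno : ∀ t, w.toList ≠ '(' :: t := fun t hc => h ((pvStartswith_paren w).2 ⟨t, hc⟩)
    have h1 : (w.toList.takeWhile (fun c => c == '(')).length = 0 := by
      cases hw : w.toList with
      | nil => simp
      | cons c t =>
        have hc : (c == '(') = false := by
          by_cases hb : c = '('
          · exact absurd (by rw [hw, hb]) (hno t)
          · simpa using hb
        simp [hc]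
    have h2 : w.toList.dropWhile (fun c => c == '(') = w.toList := by
      cases hw : w.toList with
      | nil => simp
      | cons c t =>
        have hc : (c == '(') = false := by
          by_cases hb : c = '('
          · exact absurd (by rw [hw, hb]) (hno t)
          · simpa using hb
        simp [hc]
    simp [h1, h2]
termination_by w.toList.length
decreasing_by
  obtain ⟨t, ht⟩ := (pvStartswith_paren w).1 h
  simp [PySem.Str.slice, PySem.List.slice_from_one, ht]

lemma pvTakeWhile_len_le {α : Type} (p : α → Bool) (xs : List α) :
    (xs.takeWhile p).length ≤ xs.length :=
  (List.takeWhile_sublist (l := xs) (p := p)).length_le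

lemma pvPostfixLoop_eq (w : String) (post : List String) :
    pvPostfixLoop post w =
      (List.replicate (w.toList.reverse.takeWhile (fun c => c == ')')).length ")" ++ post,
       String.ofList (w.toList.take (w.toList.length - (w.toList.reverse.takeWhile (fun c => c == ')')).length))) := by
  by_cases h : PySem.Str.endswith w ")" = true
  · obtain ⟨t, ht⟩ := (pvEndswith_paren w).1 h
    have hslice : (PySem.Str.slice w none (some (-1))).toList = t := by
      rw [PySem.Str.slice_to_neg_one, ht]; simp
    rw [pvPostfixLoop, dif_pos h, pvPostfixLoop_eq (PySem.Str.slice w none (some (-1))) (PySem.List.insert post 0 ")")]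
    have htw : (w.toList.reverse.takeWhile (fun c => c == ')')).length
        = (t.reverse.takeWhile (fun c => c == ')')).length + 1 := by
      simp [ht]
    have hle : (t.reverse.takeWhile (fun c => c == ')')).length ≤ t.length := by
      simpa using pvTakeWhile_len_le (fun c => c == ')') t.reverse
    have htake : w.toList.take (w.toList.length - (w.toList.reverse.takeWhile (fun c => c == ')')).length)
        = t.take (t.length - (t.reverse.takeWhile (fun c => c == ')')).length) := by
      rw [htw, ht]
      have hlen : (t ++ [')']).length = t.length + 1 := by simp
      rw [hlen]
      have harith : t.length + 1 - ((t.reverse.takeWhile (fun c => c == ')')).length + 1)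
          = t.length - (t.reverse.takeWhile (fun c => c == ')')).length := by omega
      rw [harith, List.take_append_of_le_length (by omega)]
    rw [htake, hslice, htw, List.replicate_succ']
    simp [PySem.List.insert, PySem.List.sliceIndices]
  · rw [pvPostfixLoop, dif_neg h]
    have hnot : ∀ t, w.toList ≠ t ++ [')'] := fun t hc => h ((pvEndswith_paren w).2 ⟨t, hc⟩)
    have htw : (w.toList.reverse.takeWhile (fun c => c == ')')).length = 0 := by
      cases hw : w.toList.reverse with
      | nil => simp
      | cons c t =>
        have hw2 : w.toList = t.reverse ++ [c] := by
          have := congrArg List.reverse hw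
          simpa using this
        have hc : (c == ')') = false := by
          by_cases hb : c = ')'
          · exact absurd (by rw [hw2, hb]) (hnot t.reverse)
          · simpa using hb
        simp [hc]
    have h3 : List.take w.length w.toList = w.toList := by simp
    rw [htw]
    simp [h3]
termination_by w.toList.length
decreasing_by
  obtain ⟨t, ht⟩ := (pvEndswith_paren w).1 h
  have hsl : (PySem.Str.slice w none (some (-1))).toList = w.toList.dropLast := PySem.Str.slice_to_neg_one w
  rw [hsl, ht]
  simp

lemma pvDropWhile_eq_drop {α : Type} (p : α → Bool) (xs : List α) :
    xs.dropWhile p = xs.drop (xs.takeWhile p).length := by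
  induction xs with
  | nil => simp
  | cons x t ih =>
    by_cases h : p x = true
    · simp [List.dropWhile, List.takeWhile, h, ih]
    · simp [List.dropWhile, List.takeWhile, h]

lemma pvWord_eq (w : String) :
    (pvPrefixLoop [] w).1 ++ [(pvPostfixLoop [] (pvPrefixLoop [] w).2).2]
      ++ (pvPostfixLoop [] (pvPrefixLoop [] w).2).1 = pvRegexSplit w := by
  rw [pvPrefixLoop_eq]
  simp only [List.nil_append]
  rw [pvPostfixLoop_eq]
  simp only [List.append_nil]
  unfold pvRegexSplit
  simp [pvDropWhile_eq_drop]

lemma pvFoldl_ext {α β : Type} (f g : β → α → β) (h : ∀ b a, f b a = g b a)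
    (init : β) (l : List α) : l.foldl f init = l.foldl g init := by
  induction l generalizing init with
  | nil => rfl
  | cons a l ih => simp only [List.foldl_cons, h, ih]

-- ===== VERDICT (by name: the statement is the Claim_ definition above) =====
theorem preprocess_words_py_spec : Claim_equal_preprocess_words_py := by
  intro words _
  unfold Spec_preprocess_words_py preprocess_words_py preprocess_words_py_alt
  have hstep : ∀ (result : List String) (word : String),
      result ++ (pvPrefixLoop [] word).1 ++ [(pvPostfixLoop [] (pvPrefixLoop [] word).2).2]
        ++ (pvPostfixLoop [] (pvPrefixLoop [] word).2).1
      = result ++ pvRegexSplit word := by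
    intro result word
    rw [← pvWord_eq word]
    simp
  calc words.foldl (fun result word =>
        let pr := pvPrefixLoop [] word
        let po := pvPostfixLoop [] pr.2
        result ++ pr.1 ++ [po.2] ++ po.1) []
      = words.foldl (fun result word => result ++ pvRegexSplit word) [] :=
        pvFoldl_ext _ _ hstep [] words
    _ = [] ++ words.flatMap pvRegexSplit := PySem.List.foldl_append_eq_flatMap _ _ _
    _ = words.flatMap pvRegexSplit := by simp
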